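-- pv_equiv track=rewrite | github.com/davidatjfs-cyber/brain | app/improvement_engine.py | suggest_improvement
-- ===== SOURCE A (Python) =====
-- SUGGESTION_MAP = {
--     "strategy_mismatch": {
--         "suggestion": "增强 pattern 匹配能力",
--         "module": "pattern_matcher.py",
--         "action": "调整 pattern 匹配阈值或增加场景特征提取",
--         "priority": "high",
--     },
--     "too_risky": {
--         "suggestion": "提高 risk penalty",
--         "module": "goal_engine.py",
--         "action": "增加高风险决策的惩罚权重",
--         "priority": "high",
--     },
--     "too_conservative": {
--         "suggestion": "适度提高风险接受度",
--         "module": "strategy_enforcer.py",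
--         "action": "降低保守策略的优先级",
--         "priority": "medium",
--     },
--     "insufficient_actions": {
--         "suggestion": "增加 action 生成能力",
--         "module": "brain_core.py",
--         "action": "要求 LLM 生成更多具体行动方案",
--         "priority": "medium",
--     },
--     "too_many_actions": {
--         "suggestion": "精简 action 生成",
--         "module": "brain_core.py",
--         "action": "限制行动方案数量在合理范围",
--         "priority": "low",
--     },
--     "bad_prediction": {
--         "suggestion": "优化 outcome predictor",
--         "module": "outcome_predictor.py",
--         "action": "调整预测模型参数或增加训练数据",
--         "priority": "high",
--     },
--     "revenue_prediction_error": {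
--         "suggestion": "优化营收预测准确性",
--         "module": "outcome_predictor.py",
--         "action": "调整 revenue_factor 或重新训练预测模型",
--         "priority": "high",
--     },
--     "profit_prediction_error": {
--         "suggestion": "优化利润预测准确性",
--         "module": "outcome_predictor.py",
--         "action": "调整 profit_factor 或增加成本因素考虑",
--         "priority": "high",
--     },
--     "no_action_overlap": {
--         "suggestion": "参考人类行动模式",
--         "module": "self_reflection.py",
--         "action": "在决策时更多参考历史成功案例的具体行动",
--         "priority": "medium",
--     },
--     "low_action_overlap": {
--         "suggestion": "提高行动方案相似度",
--         "module": "pattern_engine.py",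
--         "action": "增加相似场景的行动方案学习",
--         "priority": "medium",
--     },
--     "low_confidence": {
--         "suggestion": "提高决策置信度",
--         "module": "confidence.py",
--         "action": "增强场景识别或增加参考信息",
--         "priority": "low",
--     },
-- }
--
-- def suggest_improvement(reasons: list) -> list:
--     suggestions = []
--     seen = set()
--
--     for reason in reasons:
--         if reason in SUGGESTION_MAP and reason not in seen:
--             info = SUGGESTION_MAP[reason]
--             suggestions.append(
--                 {
--                     "reason": reason,
--                     "suggestion": info["suggestion"],
--                     "module": info["module"],
--                     "action": info["action"],
--                     "priority": info["priority"],
--                 }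
--             )
--             seen.add(reason)
--
--     suggestions.sort(
--         key=lambda x: {"high": 0, "medium": 1, "low": 2}.get(x["priority"], 3)
--     )
--
--     return suggestions
-- ===== SOURCE B (Python) =====
-- # Re-implementation: the suggestion catalogue is pre-partitioned into three
-- # per-priority lookup tables; the result is produced by three staged scans of
-- # `reasons` (high, then medium, then low), with no sort at all.
--
-- _BUCKETS = [
--     (
--         "high",
--         {
--             "strategy_mismatch": (
--                 "增强 pattern 匹配能力",
--                 "pattern_matcher.py",
--                 "调整 pattern 匹配阈值或增加场景特征提取",
--             ),
--             "too_risky": (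
--                 "提高 risk penalty",
--                 "goal_engine.py",
--                 "增加高风险决策的惩罚权重",
--             ),
--             "bad_prediction": (
--                 "优化 outcome predictor",
--                 "outcome_predictor.py",
--                 "调整预测模型参数或增加训练数据",
--             ),
--             "revenue_prediction_error": (
--                 "优化营收预测准确性",
--                 "outcome_predictor.py",
--                 "调整 revenue_factor 或重新训练预测模型",
--             ),
--             "profit_prediction_error": (
--                 "优化利润预测准确性",
--                 "outcome_predictor.py",
--                 "调整 profit_factor 或增加成本因素考虑",
--             ),
--         },
--     ),
--     (
--         "medium",
--         {
--             "too_conservative": (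
--                 "适度提高风险接受度",
--                 "strategy_enforcer.py",
--                 "降低保守策略的优先级",
--             ),
--             "insufficient_actions": (
--                 "增加 action 生成能力",
--                 "brain_core.py",
--                 "要求 LLM 生成更多具体行动方案",
--             ),
--             "no_action_overlap": (
--                 "参考人类行动模式",
--                 "self_reflection.py",
--                 "在决策时更多参考历史成功案例的具体行动",
--             ),
--             "low_action_overlap": (
--                 "提高行动方案相似度",
--                 "pattern_engine.py",
--                 "增加相似场景的行动方案学习",
--             ),
--         },
--     ),
--     (
--         "low",
--         {
--             "too_many_actions": (
--                 "精简 action 生成",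
--                 "brain_core.py",
--                 "限制行动方案数量在合理范围",
--             ),
--             "low_confidence": (
--                 "提高决策置信度",
--                 "confidence.py",
--                 "增强场景识别或增加参考信息",
--             ),
--         },
--     ),
-- ]
--
--
-- def suggest_improvement(reasons: list) -> list:
--     out = []
--     for priority, table in _BUCKETS:
--         done = set()
--         for reason in reasons:
--             entry = table.get(reason)
--             if entry is None or reason in done:
--                 continue
--             done.add(reason)
--             suggestion, module, action = entry
--             out.append(
--                 {
--                     "reason": reason,
--                     "suggestion": suggestion,
--                     "module": module,
--                     "action": action,
--                     "priority": priority,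
--                 }
--             )
--     return out
-- ===== Notes on version B (the rewrite author's own statement) =====
-- stated objective: alternative
-- what changed: replaces A's build-then-stable-sort over one reason->info dict with three staged scans of the input against per-priority lookup tables (high, medium, low), emitting each bucket in first-appearance order and concatenating, so no sort is performed.
import Mathlib
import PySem

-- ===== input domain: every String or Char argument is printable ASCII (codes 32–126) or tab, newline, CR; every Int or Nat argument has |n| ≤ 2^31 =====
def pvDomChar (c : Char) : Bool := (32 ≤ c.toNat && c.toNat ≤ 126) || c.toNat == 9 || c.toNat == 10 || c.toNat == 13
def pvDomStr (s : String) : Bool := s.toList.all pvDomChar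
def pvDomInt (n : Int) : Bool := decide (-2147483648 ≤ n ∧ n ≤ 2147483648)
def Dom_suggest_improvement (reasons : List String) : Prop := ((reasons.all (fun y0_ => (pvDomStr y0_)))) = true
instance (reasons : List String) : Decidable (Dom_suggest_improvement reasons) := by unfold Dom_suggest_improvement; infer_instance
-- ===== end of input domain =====

-- B replaces A's build-then-stable-sort with three staged scans of the input against
-- per-priority lookup tables, concatenated high ++ medium ++ low; no sort is performed.

-- ===== PORT A =====
-- A's same-module constant: one dict from reason to an info dict
def SUGGESTION_MAP : PySem.Dict String (PySem.Dict String String) :=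
  PySem.Dict.mk [
    ("strategy_mismatch", PySem.Dict.mk [("suggestion", "增强 pattern 匹配能力"), ("module", "pattern_matcher.py"), ("action", "调整 pattern 匹配阈值或增加场景特征提取"), ("priority", "high")]),
    ("too_risky", PySem.Dict.mk [("suggestion", "提高 risk penalty"), ("module", "goal_engine.py"), ("action", "增加高风险决策的惩罚权重"), ("priority", "high")]),
    ("too_conservative", PySem.Dict.mk [("suggestion", "适度提高风险接受度"), ("module", "strategy_enforcer.py"), ("action", "降低保守策略的优先级"), ("priority", "medium")]),
    ("insufficient_actions", PySem.Dict.mk [("suggestion", "增加 action 生成能力"), ("module", "brain_core.py"), ("action", "要求 LLM 生成更多具体行动方案"), ("priority", "medium")]),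
    ("too_many_actions", PySem.Dict.mk [("suggestion", "精简 action 生成"), ("module", "brain_core.py"), ("action", "限制行动方案数量在合理范围"), ("priority", "low")]),
    ("bad_prediction", PySem.Dict.mk [("suggestion", "优化 outcome predictor"), ("module", "outcome_predictor.py"), ("action", "调整预测模型参数或增加训练数据"), ("priority", "high")]),
    ("revenue_prediction_error", PySem.Dict.mk [("suggestion", "优化营收预测准确性"), ("module", "outcome_predictor.py"), ("action", "调整 revenue_factor 或重新训练预测模型"), ("priority", "high")]),
    ("profit_prediction_error", PySem.Dict.mk [("suggestion", "优化利润预测准确性"), ("module", "outcome_predictor.py"), ("action", "调整 profit_factor 或增加成本因素考虑"), ("priority", "high")]),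
    ("no_action_overlap", PySem.Dict.mk [("suggestion", "参考人类行动模式"), ("module", "self_reflection.py"), ("action", "在决策时更多参考历史成功案例的具体行动"), ("priority", "medium")]),
    ("low_action_overlap", PySem.Dict.mk [("suggestion", "提高行动方案相似度"), ("module", "pattern_engine.py"), ("action", "增加相似场景的行动方案学习"), ("priority", "medium")]),
    ("low_confidence", PySem.Dict.mk [("suggestion", "提高决策置信度"), ("module", "confidence.py"), ("action", "增强场景识别或增加参考信息"), ("priority", "low")])]

-- the suggestion dict A appends
def mkRow (reason : String) (info : PySem.Dict String String) : List (String × String) :=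
  [("reason", reason),
   ("suggestion", PySem.Dict.getD info "suggestion" ""),
   ("module", PySem.Dict.getD info "module" ""),
   ("action", PySem.Dict.getD info "action" ""),
   ("priority", PySem.Dict.getD info "priority" "")]

-- A's sort key: {"high": 0, "medium": 1, "low": 2}.get(x["priority"], 3)
def prioKey (x : List (String × String)) : Int :=
  PySem.Dict.getD (PySem.Dict.mk [("high", (0 : Int)), ("medium", 1), ("low", 2)])
    (PySem.Dict.getD (PySem.Dict.mk x) "priority" "") 3

-- A's loop body
def stepA (st : List (List (String × String)) × PySem.Set String) (reason : String) :
    List (List (String × String)) × PySem.Set String :=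
  match PySem.Dict.get? SUGGESTION_MAP reason with
  | none => st
  | some info =>
    if PySem.Set.contains st.2 reason then st
    else (st.1 ++ [mkRow reason info], PySem.Set.add st.2 reason)

def suggest_improvement (reasons : List String) : List (List (String × String)) :=
  let st := reasons.foldl stepA ([], PySem.Set.empty)
  PySem.List.sorted st.1 prioKey false

-- ===== PORT B =====
-- B's same-module constant: the catalogue pre-partitioned into per-priority tables
-- mapping reason to (suggestion, module, action)
def bucketHigh : PySem.Dict String (String × String × String) :=
  PySem.Dict.mk [
    ("strategy_mismatch", ("增强 pattern 匹配能力", "pattern_matcher.py", "调整 pattern 匹配阈值或增加场景特征提取")),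
    ("too_risky", ("提高 risk penalty", "goal_engine.py", "增加高风险决策的惩罚权重")),
    ("bad_prediction", ("优化 outcome predictor", "outcome_predictor.py", "调整预测模型参数或增加训练数据")),
    ("revenue_prediction_error", ("优化营收预测准确性", "outcome_predictor.py", "调整 revenue_factor 或重新训练预测模型")),
    ("profit_prediction_error", ("优化利润预测准确性", "outcome_predictor.py", "调整 profit_factor 或增加成本因素考虑"))]

def bucketMedium : PySem.Dict String (String × String × String) :=
  PySem.Dict.mk [
    ("too_conservative", ("适度提高风险接受度", "strategy_enforcer.py", "降低保守策略的优先级")),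
    ("insufficient_actions", ("增加 action 生成能力", "brain_core.py", "要求 LLM 生成更多具体行动方案")),
    ("no_action_overlap", ("参考人类行动模式", "self_reflection.py", "在决策时更多参考历史成功案例的具体行动")),
    ("low_action_overlap", ("提高行动方案相似度", "pattern_engine.py", "增加相似场景的行动方案学习"))]

def bucketLow : PySem.Dict String (String × String × String) :=
  PySem.Dict.mk [
    ("too_many_actions", ("精简 action 生成", "brain_core.py", "限制行动方案数量在合理范围")),
    ("low_confidence", ("提高决策置信度", "confidence.py", "增强场景识别或增加参考信息"))]

def pvBuckets : List (String × PySem.Dict String (String × String × String)) :=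
  [("high", bucketHigh), ("medium", bucketMedium), ("low", bucketLow)]

-- B's inner-loop body for one priority level
def stepL (priority : String) (table : PySem.Dict String (String × String × String))
    (st : List (List (String × String)) × PySem.Set String) (reason : String) :
    List (List (String × String)) × PySem.Set String :=
  match PySem.Dict.get? table reason with
  | none => st
  | some entry =>
    if PySem.Set.contains st.2 reason then st
    else
      (st.1 ++ [[("reason", reason), ("suggestion", entry.1), ("module", entry.2.1),
                 ("action", entry.2.2), ("priority", priority)]],
       PySem.Set.add st.2 reason)

def suggest_improvement_alt (reasons : List String) : List (List (String × String)) :=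
  pvBuckets.foldl
    (fun out pt => out ++ (reasons.foldl (stepL pt.1 pt.2) ([], PySem.Set.empty)).1) []

-- ===== PRECONDITION & SPEC =====
def Spec_suggest_improvement (reasons : List String) (out : List (List (String × String))) : Prop := out = suggest_improvement_alt reasons
instance (reasons : List String) (out : List (List (String × String))) : Decidable (Spec_suggest_improvement reasons out) := by unfold Spec_suggest_improvement; infer_instance

-- ===== CLAIM (what is proved, stated in full; the proofs are below) =====
def Claim_equal_suggest_improvement : Prop := ∀ (reasons : List String), Dom_suggest_improvement reasons → Spec_suggest_improvement reasons (suggest_improvement reasons)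

-- ===== LEMMAS AND PROOFS =====

-- every priority string stored in SUGGESTION_MAP is "high", "medium" or "low"
lemma tri_prio (r : String) (info : PySem.Dict String String)
    (h : PySem.Dict.get? SUGGESTION_MAP r = some info) :
    PySem.Dict.getD info "priority" "" = "high" ∨
    PySem.Dict.getD info "priority" "" = "medium" ∨
    PySem.Dict.getD info "priority" "" = "low" := by
  have hm := PySem.Dict.mem_items_of_get?_eq_some _ h
  simp [SUGGESTION_MAP] at hm
  rcases hm with ⟨_, hi⟩ | ⟨_, hi⟩ | ⟨_, hi⟩ | ⟨_, hi⟩ | ⟨_, hi⟩ | ⟨_, hi⟩ | ⟨_, hi⟩ | ⟨_, hi⟩ | ⟨_, hi⟩ | ⟨_, hi⟩ | ⟨_, hi⟩ <;>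
    subst hi <;> simp [PySem.Dict.getD_eq_get?_getD, PySem.Dict.get?_mk_cons]

lemma prioKey_mkRow (r : String) (info : PySem.Dict String String) :
    prioKey (mkRow r info) =
      PySem.Dict.getD (PySem.Dict.mk [("high", (0 : Int)), ("medium", 1), ("low", 2)])
        (PySem.Dict.getD info "priority" "") 3 := by
  simp [prioKey, mkRow, PySem.Dict.getD_eq_get?_getD, PySem.Dict.get?_mk_cons]

lemma insertBy_prefix {α : Type} (before : α → α → Bool) (x : α) (ys zs : List α)
    (h : ∀ y ∈ ys, before x y = false) :
    PySem.List.insertBy before x (ys ++ zs) = ys ++ PySem.List.insertBy before x zs := by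
  induction ys with
  | nil => simp
  | cons y ys ih =>
    have hy : before x y = false := h y (by simp)
    simp [PySem.List.insertBy, hy, ih (fun y hy => h y (by simp [hy]))]

lemma insertBy_all {α : Type} (before : α → α → Bool) (x : α) (ys : List α)
    (h : ∀ y ∈ ys, before x y = true) :
    PySem.List.insertBy before x ys = x :: ys := by
  cases ys with
  | nil => rfl
  | cons y ys => simp [PySem.List.insertBy, h y (by simp)]

-- a stable sort on keys drawn from {0,1,2} is the three-bucket partition
lemma foldl_insertBy_tri (s A0 A1 A2 : List (List (String × String)))
    (h0 : ∀ y ∈ A0, prioKey y = 0) (h1 : ∀ y ∈ A1, prioKey y = 1) (h2 : ∀ y ∈ A2, prioKey y = 2)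
    (hs : ∀ x ∈ s, prioKey x = 0 ∨ prioKey x = 1 ∨ prioKey x = 2) :
    List.foldl (fun acc x => PySem.List.insertBy (fun a b => decide (prioKey a < prioKey b)) x acc)
      (A0 ++ A1 ++ A2) s
    = (A0 ++ s.filter (fun x => prioKey x == 0)) ++ (A1 ++ s.filter (fun x => prioKey x == 1))
      ++ (A2 ++ s.filter (fun x => prioKey x == 2)) := by
  induction s generalizing A0 A1 A2 with
  | nil => simp
  | cons x rest ih =>
    have hrest : ∀ y ∈ rest, prioKey y = 0 ∨ prioKey y = 1 ∨ prioKey y = 2 :=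
      fun y hy => hs y (by simp [hy])
    rcases hs x (by simp) with hx | hx | hx
    · have hins : PySem.List.insertBy (fun a b => decide (prioKey a < prioKey b)) x (A0 ++ A1 ++ A2)
          = (A0 ++ [x]) ++ A1 ++ A2 := by
        rw [List.append_assoc, insertBy_prefix _ _ _ _ (by intro y hy; simp [h0 y hy, hx]),
          insertBy_all _ _ _ (by
            intro y hy
            rcases List.mem_append.mp hy with hy | hy
            · simp [h1 y hy, hx]
            · simp [h2 y hy, hx])]
        simp
      rw [List.foldl_cons, hins,
        ih (A0 ++ [x]) A1 A2 (by intro y hy; rcases List.mem_append.mp hy with hy | hy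
                                 · exact h0 y hy
                                 · simp at hy; simp [hy, hx]) h1 h2 hrest]
      simp [hx]
    · have hins : PySem.List.insertBy (fun a b => decide (prioKey a < prioKey b)) x (A0 ++ A1 ++ A2)
          = A0 ++ (A1 ++ [x]) ++ A2 := by
        rw [insertBy_prefix _ _ _ _ (by
            intro y hy
            rcases List.mem_append.mp hy with hy | hy
            · simp [h0 y hy, hx]
            · simp [h1 y hy, hx]),
          insertBy_all _ _ _ (by intro y hy; simp [h2 y hy, hx])]
        simp
      rw [List.foldl_cons, hins,
        ih A0 (A1 ++ [x]) A2 h0 (by intro y hy; rcases List.mem_append.mp hy with hy | hy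
                                    · exact h1 y hy
                                    · simp at hy; simp [hy, hx]) h2 hrest]
      simp [hx]
    · have hins : PySem.List.insertBy (fun a b => decide (prioKey a < prioKey b)) x (A0 ++ A1 ++ A2)
          = A0 ++ A1 ++ (A2 ++ [x]) := by
        rw [PySem.List.insertBy_of_forall_not_before _ _ _ (by
          intro y hy
          rcases List.mem_append.mp hy with hy | hy
          · rcases List.mem_append.mp hy with hy | hy
            · simp [h0 y hy, hx]
            · simp [h1 y hy, hx]
          · simp [h2 y hy, hx])]
        simp
      rw [List.foldl_cons, hins,
        ih A0 A1 (A2 ++ [x]) h0 h1 (by intro y hy; rcases List.mem_append.mp hy with hy | hy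
                                       · exact h2 y hy
                                       · simp at hy; simp [hy, hx]) hrest]
      simp [hx]

lemma sorted_tri (s : List (List (String × String)))
    (hs : ∀ x ∈ s, prioKey x = 0 ∨ prioKey x = 1 ∨ prioKey x = 2) :
    PySem.List.sorted s prioKey false
      = s.filter (fun x => prioKey x == 0) ++ s.filter (fun x => prioKey x == 1)
        ++ s.filter (fun x => prioKey x == 2) := by
  rw [PySem.List.sorted_eq_foldl_insertBy]
  have := foldl_insertBy_tri s [] [] [] (by simp) (by simp) (by simp) hs
  simpa using this

-- every row A accumulates has a key in {0,1,2}
lemma stepA_keys (reasons : List String) (sugs : List (List (String × String))) (seen : PySem.Set String)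
    (h : ∀ x ∈ sugs, prioKey x = 0 ∨ prioKey x = 1 ∨ prioKey x = 2) :
    ∀ x ∈ (List.foldl stepA (sugs, seen) reasons).1,
      prioKey x = 0 ∨ prioKey x = 1 ∨ prioKey x = 2 := by
  induction reasons generalizing sugs seen with
  | nil => simpa using h
  | cons r rest ih =>
    rw [List.foldl_cons]
    unfold stepA
    cases hg : PySem.Dict.get? SUGGESTION_MAP r with
    | none => exact ih sugs seen h
    | some info =>
      by_cases hseen : PySem.Set.contains seen r
      · simp only [hseen, if_true]
        exact ih sugs seen h
      · simp only [hseen, if_false, Bool.false_eq_true]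
        refine ih _ _ ?_
        intro x hx
        rcases List.mem_append.mp hx with hx | hx
        · exact h x hx
        · simp at hx
          subst hx
          rw [prioKey_mkRow]
          rcases tri_prio r info hg with hp | hp | hp <;>
            simp [hp, PySem.Dict.getD_eq_get?_getD, PySem.Dict.get?_mk_cons]

-- A's fold only appends: factor out the accumulated prefix
lemma stepA_prefix (reasons : List String) (sugs : List (List (String × String))) (seen : PySem.Set String) :
    List.foldl stepA (sugs, seen) reasons
      = (sugs ++ (List.foldl stepA ([], seen) reasons).1, (List.foldl stepA ([], seen) reasons).2) := by
  induction reasons generalizing sugs seen with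
  | nil => simp
  | cons r rest ih =>
    rw [List.foldl_cons, List.foldl_cons]
    cases hg : PySem.Dict.get? SUGGESTION_MAP r with
    | none =>
      have e1 : stepA (sugs, seen) r = (sugs, seen) := by simp [stepA, hg]
      have e2 : stepA ([], seen) r = ([], seen) := by simp [stepA, hg]
      rw [e1, e2]; exact ih sugs seen
    | some info =>
      by_cases hseen : r ∈ seen
      · have e1 : stepA (sugs, seen) r = (sugs, seen) := by simp [stepA, hg, hseen]
        have e2 : stepA ([], seen) r = ([], seen) := by simp [stepA, hg, hseen]
        rw [e1, e2]; exact ih sugs seen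
      · have e1 : stepA (sugs, seen) r = (sugs ++ [mkRow r info], PySem.Set.add seen r) := by
          simp [stepA, hg, hseen]
        have e2 : stepA ([], seen) r = ([] ++ [mkRow r info], PySem.Set.add seen r) := by
          simp [stepA, hg, hseen]
        rw [e1, e2, ih (sugs ++ [mkRow r info]) (PySem.Set.add seen r),
          ih ([] ++ [mkRow r info]) (PySem.Set.add seen r)]
        simp

-- each per-priority table is the restriction of SUGGESTION_MAP to that priority
lemma corr_bucket (pk : String) (tbl : PySem.Dict String (String × String × String))
    (hpt : (pk, tbl) ∈ pvBuckets) (r : String) :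
    PySem.Dict.get? tbl r
      = (PySem.Dict.get? SUGGESTION_MAP r).bind (fun info =>
          if PySem.Dict.getD info "priority" "" == pk
          then some (PySem.Dict.getD info "suggestion" "", PySem.Dict.getD info "module" "",
                     PySem.Dict.getD info "action" "")
          else none) := by
  by_cases h1 : r = "strategy_mismatch"
  · subst h1; simp [pvBuckets] at hpt
    rcases hpt with ⟨h, h'⟩ | ⟨h, h'⟩ | ⟨h, h'⟩ <;> subst h <;> subst h' <;> decide
  by_cases h2 : r = "too_risky"
  · subst h2; simp [pvBuckets] at hpt
    rcases hpt with ⟨h, h'⟩ | ⟨h, h'⟩ | ⟨h, h'⟩ <;> subst h <;> subst h' <;> decide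
  by_cases h3 : r = "too_conservative"
  · subst h3; simp [pvBuckets] at hpt
    rcases hpt with ⟨h, h'⟩ | ⟨h, h'⟩ | ⟨h, h'⟩ <;> subst h <;> subst h' <;> decide
  by_cases h4 : r = "insufficient_actions"
  · subst h4; simp [pvBuckets] at hpt
    rcases hpt with ⟨h, h'⟩ | ⟨h, h'⟩ | ⟨h, h'⟩ <;> subst h <;> subst h' <;> decide
  by_cases h5 : r = "too_many_actions"
  · subst h5; simp [pvBuckets] at hpt
    rcases hpt with ⟨h, h'⟩ | ⟨h, h'⟩ | ⟨h, h'⟩ <;> subst h <;> subst h' <;> decide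
  by_cases h6 : r = "bad_prediction"
  · subst h6; simp [pvBuckets] at hpt
    rcases hpt with ⟨h, h'⟩ | ⟨h, h'⟩ | ⟨h, h'⟩ <;> subst h <;> subst h' <;> decide
  by_cases h7 : r = "revenue_prediction_error"
  · subst h7; simp [pvBuckets] at hpt
    rcases hpt with ⟨h, h'⟩ | ⟨h, h'⟩ | ⟨h, h'⟩ <;> subst h <;> subst h' <;> decide
  by_cases h8 : r = "profit_prediction_error"
  · subst h8; simp [pvBuckets] at hpt
    rcases hpt with ⟨h, h'⟩ | ⟨h, h'⟩ | ⟨h, h'⟩ <;> subst h <;> subst h' <;> decide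
  by_cases h9 : r = "no_action_overlap"
  · subst h9; simp [pvBuckets] at hpt
    rcases hpt with ⟨h, h'⟩ | ⟨h, h'⟩ | ⟨h, h'⟩ <;> subst h <;> subst h' <;> decide
  by_cases h10 : r = "low_action_overlap"
  · subst h10; simp [pvBuckets] at hpt
    rcases hpt with ⟨h, h'⟩ | ⟨h, h'⟩ | ⟨h, h'⟩ <;> subst h <;> subst h' <;> decide
  by_cases h11 : r = "low_confidence"
  · subst h11; simp [pvBuckets] at hpt
    rcases hpt with ⟨h, h'⟩ | ⟨h, h'⟩ | ⟨h, h'⟩ <;> subst h <;> subst h' <;> decide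
  · -- r is none of the 11 keys: both lookups miss
    simp [pvBuckets] at hpt
    have hs : PySem.Dict.get? SUGGESTION_MAP r = none := by
      simp [SUGGESTION_MAP, PySem.Dict.get?_mk_cons,
        Ne.symm h1, Ne.symm h2, Ne.symm h3, Ne.symm h4, Ne.symm h5, Ne.symm h6,
        Ne.symm h7, Ne.symm h8, Ne.symm h9, Ne.symm h10, Ne.symm h11]
      rfl
    rw [hs]
    rcases hpt with ⟨h, h'⟩ | ⟨h, h'⟩ | ⟨h, h'⟩ <;> subst h' <;>
      simp [bucketHigh, bucketMedium, bucketLow, PySem.Dict.get?_mk_cons,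
        Ne.symm h1, Ne.symm h2, Ne.symm h3, Ne.symm h4, Ne.symm h5, Ne.symm h6,
        Ne.symm h7, Ne.symm h8, Ne.symm h9, Ne.symm h10, Ne.symm h11] <;> rfl

-- one of B's level scans = the prioKey-filter of A's accumulated list
lemma scan_level (pk : String) (tbl : PySem.Dict String (String × String × String)) (rk : Int)
    (hpt : (pk, tbl) ∈ pvBuckets)
    (hrk : PySem.Dict.getD (PySem.Dict.mk [("high", (0 : Int)), ("medium", 1), ("low", 2)]) pk 3 = rk)
    (hne : ∀ p', (p' = "high" ∨ p' = "medium" ∨ p' = "low") → p' ≠ pk →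
      PySem.Dict.getD (PySem.Dict.mk [("high", (0 : Int)), ("medium", 1), ("low", 2)]) p' 3 ≠ rk) :
    ∀ (reasons : List String) (out : List (List (String × String))) (done seen : PySem.Set String),
    (∀ x, x ∈ done ↔ x ∈ seen ∧ (PySem.Dict.get? tbl x).isSome = true) →
    (List.foldl (stepL pk tbl) (out, done) reasons).1
      = out ++ ((List.foldl stepA ([], seen) reasons).1).filter (fun x => prioKey x == rk) := by
  intro reasons
  induction reasons with
  | nil => intro out done seen _; simp
  | cons r rest ih =>
    intro out done seen hinv
    rw [List.foldl_cons, List.foldl_cons]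
    have hcorr := corr_bucket pk tbl hpt r
    cases hg : PySem.Dict.get? SUGGESTION_MAP r with
    | none =>
      rw [hg] at hcorr
      simp only [Option.bind] at hcorr
      have eA : stepA ([], seen) r = ([], seen) := by simp [stepA, hg]
      have eB : stepL pk tbl (out, done) r = (out, done) := by simp [stepL, hcorr]
      rw [eA, eB]; exact ih out done seen hinv
    | some info =>
      rw [hg] at hcorr
      simp only [Option.bind] at hcorr
      by_cases hp : PySem.Dict.getD info "priority" "" = pk
      · -- this reason belongs to this bucket
        rw [if_pos (by simp [hp])] at hcorr
        by_cases hseen : r ∈ seen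
        · have hdone : r ∈ done := (hinv r).mpr ⟨hseen, by rw [hcorr]; rfl⟩
          have eA : stepA ([], seen) r = ([], seen) := by simp [stepA, hg, hseen]
          have eB : stepL pk tbl (out, done) r = (out, done) := by simp [stepL, hcorr, hdone]
          rw [eA, eB]; exact ih out done seen hinv
        · have hdone : r ∉ done := fun h => hseen ((hinv r).mp h).1
          have eA : stepA ([], seen) r = ([] ++ [mkRow r info], PySem.Set.add seen r) := by
            simp [stepA, hg, hseen]
          have eB : stepL pk tbl (out, done) r
              = (out ++ [mkRow r info], PySem.Set.add done r) := by
            simp [stepL, hcorr, hdone, mkRow, hp]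
          have hinv' : ∀ x, x ∈ PySem.Set.add done r ↔
              x ∈ PySem.Set.add seen r ∧ (PySem.Dict.get? tbl x).isSome = true := by
            intro x
            simp only [PySem.Set.mem_add]
            constructor
            · rintro (hx | rfl)
              · exact ⟨Or.inl ((hinv x).mp hx).1, ((hinv x).mp hx).2⟩
              · exact ⟨Or.inr rfl, by rw [hcorr]; rfl⟩
            · rintro ⟨hx | rfl, hsome⟩
              · exact Or.inl ((hinv x).mpr ⟨hx, hsome⟩)
              · exact Or.inr rfl
          have hkey : prioKey (mkRow r info) = rk := by rw [prioKey_mkRow, hp, hrk]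
          rw [eA, eB, ih (out ++ [mkRow r info]) (PySem.Set.add done r) (PySem.Set.add seen r) hinv',
            stepA_prefix rest ([] ++ [mkRow r info]) (PySem.Set.add seen r)]
          simp [hkey]
      · -- this reason maps to another priority: B's table misses it
        rw [if_neg (by simp [hp])] at hcorr
        have eB : stepL pk tbl (out, done) r = (out, done) := by simp [stepL, hcorr]
        by_cases hseen : r ∈ seen
        · have eA : stepA ([], seen) r = ([], seen) := by simp [stepA, hg, hseen]
          rw [eA, eB]; exact ih out done seen hinv
        · have eA : stepA ([], seen) r = ([] ++ [mkRow r info], PySem.Set.add seen r) := by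
            simp [stepA, hg, hseen]
          have hinv' : ∀ x, x ∈ done ↔
              x ∈ PySem.Set.add seen r ∧ (PySem.Dict.get? tbl x).isSome = true := by
            intro x
            simp only [PySem.Set.mem_add]
            constructor
            · intro hx; exact ⟨Or.inl ((hinv x).mp hx).1, ((hinv x).mp hx).2⟩
            · rintro ⟨hx | rfl, hsome⟩
              · exact (hinv x).mpr ⟨hx, hsome⟩
              · exact absurd hsome (by rw [hcorr]; simp)
          have hkey : prioKey (mkRow r info) ≠ rk := by
            rw [prioKey_mkRow]; exact hne _ (tri_prio r info hg) hp
          rw [eA, eB, ih out done (PySem.Set.add seen r) hinv',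
            stepA_prefix rest ([] ++ [mkRow r info]) (PySem.Set.add seen r)]
          simp [hkey]

-- ===== VERDICT (by name: the statement is the Claim_ definition above) =====
theorem suggest_improvement_spec : Claim_equal_suggest_improvement := by
  intro reasons _
  unfold Spec_suggest_improvement suggest_improvement suggest_improvement_alt
  have hkeys := stepA_keys reasons [] PySem.Set.empty (by simp)
  have hempty : ∀ (tbl : PySem.Dict String (String × String × String)) (x : String),
      x ∈ PySem.Set.empty (α := String) ↔
        x ∈ PySem.Set.empty (α := String) ∧ (PySem.Dict.get? tbl x).isSome = true := by
    intro tbl x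
    simp [PySem.Set.empty]
  have hH := scan_level "high" bucketHigh 0 (by simp [pvBuckets]) (by decide)
    (by rintro p' (rfl | rfl | rfl) h
        · exact absurd rfl h
        · decide
        · decide)
    reasons [] PySem.Set.empty PySem.Set.empty (hempty _)
  have hM := scan_level "medium" bucketMedium 1 (by simp [pvBuckets]) (by decide)
    (by rintro p' (rfl | rfl | rfl) h
        · decide
        · exact absurd rfl h
        · decide)
    reasons [] PySem.Set.empty PySem.Set.empty (hempty _)
  have hL := scan_level "low" bucketLow 2 (by simp [pvBuckets]) (by decide)
    (by rintro p' (rfl | rfl | rfl) h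
        · decide
        · decide
        · exact absurd rfl h)
    reasons [] PySem.Set.empty PySem.Set.empty (hempty _)
  rw [sorted_tri _ hkeys]
  simp only [pvBuckets, List.foldl_cons, List.foldl_nil]
  rw [hH, hM, hL]
  simp
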